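-- pv_equiv track=rewrite | github.com/MendozaLab/erdos-experiments | Erdos30/exp_009c_spectral_torus.py | enumerate_sidon_states
-- ===== SOURCE A (Python) =====
-- def enumerate_sidon_states(W):
--     """Enumerate all Sidon subsets of {0,...,W-1}."""
--     states = []
--
--     def backtrack(start, current, diffs):
--         mask = frozenset(current)
--         states.append(tuple(sorted(current)))
--
--         for x in range(start, W):
--             new_diffs = []
--             valid = True
--             for a in current:
--                 d = abs(x - a)
--                 if d in diffs or d in new_diffs:
--                     valid = False
--                     break
--                 new_diffs.append(d)
--             if valid:
--                 current.append(x)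
--                 diffs_new = diffs | set(new_diffs)
--                 backtrack(x + 1, current, diffs_new)
--                 current.pop()
--
--     backtrack(0, [], set())
--     return states
-- ===== SOURCE B (Python) =====
-- def enumerate_sidon_states(W):
--     """Enumerate all Sidon subsets of {0,...,W-1} iteratively with an explicit stack."""
--     states = []
--     stack = [(0, (), frozenset())]
--     while stack:
--         start, current, diffs = stack.pop()
--         states.append(tuple(sorted(current)))
--         children = []
--         for x in range(start, W):
--             new_diffs = []
--             valid = True
--             for a in current:
--                 d = abs(x - a)
--                 if d in diffs or d in new_diffs:
--                     valid = False
--                     break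
--                 new_diffs.append(d)
--             if valid:
--                 children.append((x + 1, current + (x,), diffs | set(new_diffs)))
--         stack.extend(reversed(children))
--     return states
-- ===== Notes on version B (the rewrite author's own statement) =====
-- stated objective: alternative
-- what changed: The recursive backtracking (nested closure mutating shared current/diffs) is replaced by an explicit-stack iterative DFS over immutable frames (start, current, diffs), pushing children in reverse so the LIFO stack emits the same preorder.
import Mathlib
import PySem

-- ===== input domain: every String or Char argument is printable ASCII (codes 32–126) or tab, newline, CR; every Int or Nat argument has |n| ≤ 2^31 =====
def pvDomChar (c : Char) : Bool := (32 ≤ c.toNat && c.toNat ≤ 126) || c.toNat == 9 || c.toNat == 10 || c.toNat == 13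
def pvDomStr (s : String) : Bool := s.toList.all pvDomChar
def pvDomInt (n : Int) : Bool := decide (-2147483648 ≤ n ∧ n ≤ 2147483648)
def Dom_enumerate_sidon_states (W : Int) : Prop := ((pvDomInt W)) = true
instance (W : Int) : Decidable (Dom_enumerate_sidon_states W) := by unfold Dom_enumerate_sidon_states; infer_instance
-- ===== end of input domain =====

-- B replaces A's recursive backtracking with an explicit-stack DFS over frames (same preorder,
-- same output); objective: alternative decomposition, same cost.

-- ===== PORT A =====
-- inner 'for a in current' loop of both Pythons: build new_diffs, reject on a collision
def pvNewDiffs (x : Int) (diffs : PySem.Set Int) : List Int → List Int → Option (List Int)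
  | acc, [] => some acc
  | acc, a :: rest =>
    let d := |x - a|
    if d ∈ diffs ∨ d ∈ acc then none else pvNewDiffs x diffs (acc ++ [d]) rest

-- backtrack(start, current, diffs): emit sorted(current), then loop x over range(start, W);
-- the Nat fuel is a totality guard, kept = (W - x).toNat so the loop runs exactly to W.
mutual
def sidonBT (W : Int) (fuel : Nat) (start : Int) (current : List Int) (diffs : PySem.Set Int) :
    List (List Int) :=
  PySem.List.sorted current (fun v => v) false :: sidonLoop W fuel start current diffs
  termination_by (fuel, 1)

def sidonLoop (W : Int) : Nat → Int → List Int → PySem.Set Int → List (List Int)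
  | 0, _, _, _ => []
  | f + 1, x, current, diffs =>
    if x < W then
      (match pvNewDiffs x diffs [] current with
       | some nd => sidonBT W f (x + 1) (current ++ [x]) (PySem.Set.union diffs nd)
       | none => []) ++ sidonLoop W f (x + 1) current diffs
    else []
  termination_by fuel _ _ _ => (fuel, 0)
end

def enumerate_sidon_states (W : Int) : List (List Int) :=
  sidonBT W W.toNat 0 [] []

-- ===== PORT B =====
-- a frame is (fuel, start, current, diffs); fuel is the totality guard as in port A
def sidonChildren (W : Int) (current : List Int) (diffs : PySem.Set Int) :
    Nat → Int → List (Nat × Int × List Int × PySem.Set Int)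
  | 0, _ => []
  | f + 1, x =>
    if x < W then
      (match pvNewDiffs x diffs [] current with
       | some nd => [(f, x + 1, current ++ [x], PySem.Set.union diffs nd)]
       | none => []) ++ sidonChildren W current diffs f (x + 1)
    else []

def pvStackMeasure : List (Nat × Int × List Int × PySem.Set Int) → Nat
  | [] => 0
  | (f, _, _, _) :: rest => 2 ^ f + pvStackMeasure rest

theorem pvStackMeasure_append (a b : List (Nat × Int × List Int × PySem.Set Int)) :
    pvStackMeasure (a ++ b) = pvStackMeasure a + pvStackMeasure b := by
  induction a with
  | nil => simp [pvStackMeasure]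
  | cons fr rest ih => obtain ⟨f, s, c, d⟩ := fr; simp [pvStackMeasure, ih]; omega

theorem sidonChildren_measure (W : Int) (c d : List Int) :
    ∀ (f : Nat) (x : Int), pvStackMeasure (sidonChildren W c d f x) + 1 ≤ 2 ^ f := by
  intro f
  induction f with
  | zero => intro x; simp [sidonChildren, pvStackMeasure]
  | succ f ih =>
    intro x
    by_cases hx : x < W
    · simp only [sidonChildren, if_pos hx, pvStackMeasure_append]
      have h2 := ih (x + 1)
      rcases h : pvNewDiffs x d [] c with _ | nd <;>
        simp only [pvStackMeasure, pow_succ] <;> omega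
    · simp only [sidonChildren, if_neg hx, pvStackMeasure]
      exact Nat.one_le_two_pow

-- while stack: pop a frame, emit sorted(current), push its children (in increasing-x order on top)
def sidonRun (W : Int) : List (Nat × Int × List Int × PySem.Set Int) → List (List Int)
  | [] => []
  | (f, start, current, diffs) :: rest =>
    PySem.List.sorted current (fun v => v) false ::
      sidonRun W (sidonChildren W current diffs f start ++ rest)
  termination_by stack => pvStackMeasure stack
  decreasing_by
    simp only [pvStackMeasure_append, pvStackMeasure]
    have := sidonChildren_measure W current diffs f start
    omega

def enumerate_sidon_states_alt (W : Int) : List (List Int) :=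
  sidonRun W [(W.toNat, 0, [], [])]

-- ===== PRECONDITION & SPEC =====
def Spec_enumerate_sidon_states (W : Int) (out : List (List Int)) : Prop := out = enumerate_sidon_states_alt W
instance (W : Int) (out : List (List Int)) : Decidable (Spec_enumerate_sidon_states W out) := by unfold Spec_enumerate_sidon_states; infer_instance

-- ===== CLAIM (what is proved, stated in full; the proofs are below) =====
def Claim_equal_enumerate_sidon_states : Prop := ∀ (W : Int), Dom_enumerate_sidon_states W → Spec_enumerate_sidon_states W (enumerate_sidon_states W)

-- ===== LEMMAS AND PROOFS =====
theorem sidonLoop_eq_children (W : Int) (c : List Int) (d : PySem.Set Int) :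
    ∀ (f : Nat) (x : Int),
      sidonLoop W f x c d =
        (sidonChildren W c d f x).flatMap (fun fr => sidonBT W fr.1 fr.2.1 fr.2.2.1 fr.2.2.2) := by
  intro f
  induction f with
  | zero => intro x; simp [sidonLoop, sidonChildren]
  | succ f ih =>
    intro x
    by_cases hx : x < W
    · simp only [sidonLoop, sidonChildren, if_pos hx, List.flatMap_append, ih (x + 1)]
      rcases pvNewDiffs x d [] c with _ | nd <;> simp
    · simp [sidonLoop, sidonChildren, if_neg hx]

theorem sidonRun_eq_flatMap (W : Int) :
    ∀ (stack : List (Nat × Int × List Int × PySem.Set Int)),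
      sidonRun W stack = stack.flatMap (fun fr => sidonBT W fr.1 fr.2.1 fr.2.2.1 fr.2.2.2) := by
  intro stack
  fun_induction sidonRun W stack with
  | case1 => simp
  | case2 f start current diffs rest ih =>
    rw [ih, List.flatMap_append, List.flatMap_cons]
    rw [sidonBT, sidonLoop_eq_children]
    simp

-- ===== VERDICT (by name: the statement is the Claim_ definition above) =====
theorem enumerate_sidon_states_spec : Claim_equal_enumerate_sidon_states := by
  intro W _
  unfold Spec_enumerate_sidon_states enumerate_sidon_states enumerate_sidon_states_alt
  rw [sidonRun_eq_flatMap]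
  simp [sidonBT]
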